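-- pv_equiv track=rewrite | github.com/82deutschmark/arc-explainer | server/python/grover_executor.py | _is_safe_import
-- ===== SOURCE A (Python) =====
-- SAFE_IMPORT_MODULES: tuple[str, ...] = (
--     "collections",
--     "collections.abc",
--     "copy",
--     "functools",
--     "itertools",
--     "math",
--     "statistics",
--     "typing",
-- )
--
-- def _is_safe_import(module_name: str | None) -> bool:
--     """Return True if the import target is included in the safe whitelist."""
--     if not module_name:
--         return False
--
--     # Accept either the exact module or any parent module in the whitelist so
--     # statements like `from collections import Counter` or
--     # `from collections.abc import Iterable` succeed.
--     target = module_name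
--     while target:
--         if target in SAFE_IMPORT_MODULES:
--             return True
--         if "." not in target:
--             break
--         target = target.rsplit(".", 1)[0]
--     return module_name in SAFE_IMPORT_MODULES
-- ===== SOURCE B (Python) =====
-- SAFE_IMPORT_MODULES: tuple[str, ...] = (
--     "collections",
--     "collections.abc",
--     "copy",
--     "functools",
--     "itertools",
--     "math",
--     "statistics",
--     "typing",
-- )
--
--
-- def _is_safe_import(module_name: str | None) -> bool:
--     """Return True if the import target is included in the safe whitelist."""
--     if not module_name:
--         return False
--     return any(
--         module_name == m or module_name.startswith(m + ".")
--         for m in SAFE_IMPORT_MODULES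
--     )
-- ===== Notes on version B (the rewrite author's own statement) =====
-- stated objective: simpler
-- what changed: B scans the fixed whitelist once, accepting exact matches or dotted-prefix matches (m + '.'), instead of A's loop that repeatedly rsplits module_name to walk up its parent chain testing each ancestor for membership.
import Mathlib
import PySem

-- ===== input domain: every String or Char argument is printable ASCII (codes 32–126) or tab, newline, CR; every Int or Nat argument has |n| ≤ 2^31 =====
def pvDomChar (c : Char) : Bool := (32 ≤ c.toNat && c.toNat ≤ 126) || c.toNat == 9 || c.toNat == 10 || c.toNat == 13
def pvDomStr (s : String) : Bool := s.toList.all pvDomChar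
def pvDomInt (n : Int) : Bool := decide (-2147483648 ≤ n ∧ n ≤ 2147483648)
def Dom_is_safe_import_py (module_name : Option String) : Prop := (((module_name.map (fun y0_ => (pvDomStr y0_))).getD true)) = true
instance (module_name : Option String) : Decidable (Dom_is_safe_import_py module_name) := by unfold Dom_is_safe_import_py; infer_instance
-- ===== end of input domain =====

-- B replaces A's parent-chain rsplit walk by a single scan of the fixed whitelist with exact/dotted-prefix matching (simpler).


-- ===== PORT A =====
def pvSafeModules : List String :=
  ["collections", "collections.abc", "copy", "functools", "itertools", "math", "statistics", "typing"]

def pvSafe : List (List Char) := pvSafeModules.map String.toList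

-- hand port of target.rsplit(".", 1)[0] (A only uses it when "." in target): everything before the LAST '.'; exact there
def pvRsplitHead (cs : List Char) : List Char :=
  ((cs.reverse.dropWhile (fun c => c != '.')).drop 1).reverse

theorem pvRsplitHead_length_lt (cs : List Char) (h : '.' ∈ cs) :
    (pvRsplitHead cs).length < cs.length := by
  have h1 : (cs.reverse.dropWhile (fun c => c != '.')).length ≤ cs.length := by
    simpa using List.length_dropWhile_le (fun c => c != '.') cs.reverse
  have h0 : cs.length ≠ 0 := by cases cs <;> simp_all
  simp only [pvRsplitHead, List.length_reverse, List.length_drop]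
  omega

-- the while-loop of A: mn is module_name, target the shrinking ancestor
def pvALoop (mn target : List Char) : Bool :=
  if target.isEmpty then pvSafe.contains mn
  else if pvSafe.contains target then true
  else if h : target.contains '.' = false then pvSafe.contains mn
  else pvALoop mn (pvRsplitHead target)
termination_by target.length
decreasing_by
  exact pvRsplitHead_length_lt _ (by simpa using h)

def is_safe_import_py (module_name : Option String) : Bool :=
  match module_name with
  | none => false
  | some s => if s.toList.isEmpty then false else pvALoop s.toList s.toList

-- ===== PORT B =====
def is_safe_import_py_alt (module_name : Option String) : Bool :=
  match module_name with
  | none => false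
  | some s =>
    if s.toList.isEmpty then false
    else pvSafeModules.any (fun m => s == m || PySem.Str.startswith s (m ++ "."))

-- ===== PRECONDITION & SPEC =====
def Spec_is_safe_import_py (module_name : Option String) (out : Bool) : Prop := out = is_safe_import_py_alt module_name
instance (module_name : Option String) (out : Bool) : Decidable (Spec_is_safe_import_py module_name out) := by unfold Spec_is_safe_import_py; infer_instance

-- ===== CLAIM (what is proved, stated in full; the proofs are below) =====
def Claim_equal_is_safe_import_py : Prop := ∀ (module_name : Option String), Dom_is_safe_import_py module_name → Spec_is_safe_import_py module_name (is_safe_import_py module_name)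

-- ===== LEMMAS AND PROOFS =====

-- B's test, on the char-list side
def pvAnc (cs : List Char) : Bool := pvSafe.any (fun m => m == cs || (m ++ ['.']).isPrefixOf cs)

theorem pvRsplit_decomp (cs : List Char) (h : '.' ∈ cs) :
    ∃ t, cs = pvRsplitHead cs ++ '.' :: t ∧ '.' ∉ t := by
  have hmem : '.' ∈ cs.reverse := by simpa
  have hne : cs.reverse.dropWhile (fun c => c != '.') ≠ [] := by
    intro hnil
    have := (List.dropWhile_eq_nil_iff).1 hnil '.' hmem
    simp at this
  obtain ⟨x, v, hxv⟩ := List.exists_cons_of_ne_nil hne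
  have hx : x = '.' := by
    have h2 := List.head_dropWhile_not (fun c => c != '.') (l := cs.reverse) hne
    simp only [hxv, List.head_cons] at h2
    simpa using h2
  have hsplit : cs.reverse = cs.reverse.takeWhile (fun c => c != '.') ++ '.' :: v := by
    conv_lhs => rw [← List.takeWhile_append_dropWhile (p := fun c => c != '.') (l := cs.reverse)]
    rw [hxv, hx]
  have hr : pvRsplitHead cs = v.reverse := by
    simp [pvRsplitHead, hxv]
  refine ⟨(cs.reverse.takeWhile (fun c => c != '.')).reverse, ?_, ?_⟩
  · rw [hr]
    calc cs = cs.reverse.reverse := by simp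
    _ = (cs.reverse.takeWhile (fun c => c != '.') ++ '.' :: v).reverse := by rw [← hsplit]
    _ = v.reverse ++ '.' :: (cs.reverse.takeWhile (fun c => c != '.')).reverse := by simp
  · intro hdot
    have := List.mem_takeWhile_imp (List.mem_reverse.1 hdot)
    simp at this

theorem pvPrefix_dot_cases (r t m : List Char) (ht : '.' ∉ t)
    (hp : m ++ ['.'] <+: r ++ '.' :: t) : m = r ∨ m ++ ['.'] <+: r := by
  have hr : r ++ ['.'] <+: r ++ '.' :: t := ⟨t, by simp⟩
  rcases lt_trichotomy m.length r.length with hl | hl | hl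
  · right
    exact List.prefix_of_prefix_length_le hp (List.prefix_append r ('.' :: t)) (by simp; omega)
  · left
    have hm : m <+: r ++ '.' :: t := (List.prefix_append m ['.']).trans hp
    exact (List.prefix_of_prefix_length_le hm (List.prefix_append r ('.' :: t)) (by omega)).eq_of_length hl
  · exfalso
    have h1 : r ++ ['.'] <+: m ++ ['.'] :=
      List.prefix_of_prefix_length_le hr hp (by simp; omega)
    have h2 : r ++ ['.'] <+: m :=
      List.prefix_of_prefix_length_le h1 (List.prefix_append m ['.']) (by simp; omega)
    obtain ⟨m', rfl⟩ := h2
    have h3 : m' ++ ['.'] <+: t := by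
      have : (r ++ ['.']) ++ (m' ++ ['.']) <+: (r ++ ['.']) ++ t := by
        simpa using hp
      exact (List.prefix_append_right_inj (r ++ ['.'])).1 this
    exact ht (h3.subset (by simp))

theorem pvALoop_eq (n : Nat) : ∀ cs mn : List Char, cs.length ≤ n →
    pvALoop mn cs = (pvSafe.contains mn || pvAnc cs) := by
  induction n with
  | zero =>
    intro cs mn hlen
    have : cs = [] := List.length_eq_zero_iff.1 (Nat.le_zero.1 hlen)
    subst this
    rw [pvALoop]
    simp [pvAnc, pvSafe, pvSafeModules]
  | succ n ih =>
    intro cs mn hlen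
    rw [pvALoop]
    by_cases hemp : cs.isEmpty = true
    · have : cs = [] := by simpa using hemp
      subst this
      simp [pvAnc, pvSafe, pvSafeModules]
    · rw [if_neg hemp]
      by_cases hcs : pvSafe.contains cs = true
      · have hanc : pvAnc cs = true := by
          have hmem : cs ∈ pvSafe := List.contains_iff_mem.1 hcs
          simp only [pvAnc, List.any_eq_true, Bool.or_eq_true, beq_iff_eq]
          exact ⟨cs, hmem, Or.inl rfl⟩
        rw [if_pos hcs, hanc, Bool.or_true]
      · rw [if_neg hcs]
        have hnotmem : cs ∉ pvSafe := fun hmem => hcs (List.contains_iff_mem.2 hmem)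
        by_cases hdot : cs.contains '.' = false
        · -- no dot: break out of the loop, and pvAnc cs is false
          have hnd : '.' ∉ cs := by
            intro hmem
            rw [List.contains_iff_mem.2 hmem] at hdot
            simp at hdot
          have hanc : pvAnc cs = false := by
            simp only [pvAnc, List.any_eq_false]
            intro m hm
            simp only [Bool.or_eq_true, not_or, beq_iff_eq, List.isPrefixOf_iff_prefix]
            exact ⟨fun heq => hnotmem (heq ▸ hm), fun hpre => hnd (hpre.subset (by simp))⟩
          rw [dif_pos hdot, hanc, Bool.or_false]
        · rw [dif_neg hdot]
          have hdot' : '.' ∈ cs := by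
            by_contra hnd
            exact hdot (by simpa using hnd)
          obtain ⟨t, hdecomp, hnt⟩ := pvRsplit_decomp cs hdot'
          have hlt := pvRsplitHead_length_lt cs hdot'
          rw [ih (pvRsplitHead cs) mn (by omega)]
          have hrp : pvRsplitHead cs <+: cs := ⟨'.' :: t, hdecomp.symm⟩
          have hanc : pvAnc cs = pvAnc (pvRsplitHead cs) := by
            -- elementwise: m matches cs iff it matches the parent (equality with cs is excluded)
            rw [Bool.eq_iff_iff]
            simp only [pvAnc, List.any_eq_true, Bool.or_eq_true, beq_iff_eq,
              List.isPrefixOf_iff_prefix]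
            constructor
            · rintro ⟨m, hm, hcase⟩
              rcases hcase with rfl | hpre
              · exact absurd hm hnotmem
              · rw [hdecomp] at hpre
                rcases pvPrefix_dot_cases _ t m hnt hpre with heq | h
                · exact ⟨m, hm, Or.inl heq⟩
                · exact ⟨m, hm, Or.inr h⟩
            · rintro ⟨m, hm, hcase⟩
              rcases hcase with heq | hpre
              · refine ⟨m, hm, Or.inr ⟨t, ?_⟩⟩
                rw [heq]
                conv_rhs => rw [hdecomp]
                simp
              · exact ⟨m, hm, Or.inr (hpre.trans hrp)⟩
          rw [hanc]

-- bridge: B's string-side any equals pvAnc with the equality clause absorbed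
theorem pvAlt_eq (s : String) :
    pvSafeModules.any (fun m => s == m || PySem.Str.startswith s (m ++ ".")) = pvAnc s.toList := by
  simp only [pvAnc, pvSafe, List.any_map]
  refine List.any_congr rfl (fun m => ?_)
  simp only [Function.comp, PySem.Str.startswith_eq, PySem.Chars.startswith]
  have h1 : (s == m) = (m.toList == s.toList) := by
    rw [Bool.eq_iff_iff]
    simp only [beq_iff_eq, String.toList_inj]
    exact eq_comm
  have h2 : (m ++ ".").toList = m.toList ++ ['.'] := by
    rw [String.toList_append]
    rfl
  rw [h1, h2]

-- ===== VERDICT (by name: the statement is the Claim_ definition above) =====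
theorem is_safe_import_py_spec : Claim_equal_is_safe_import_py := by
  unfold Claim_equal_is_safe_import_py
  intro mn _
  unfold Spec_is_safe_import_py is_safe_import_py is_safe_import_py_alt
  cases mn with
  | none => rfl
  | some s =>
    by_cases hemp : s.toList.isEmpty
    · simp [hemp]
    · simp only [hemp]
      rw [pvALoop_eq s.toList.length s.toList s.toList le_rfl, pvAlt_eq]
      by_cases hc : pvSafe.contains s.toList = true
      · have hanc : pvAnc s.toList = true := by
          have hmem : s.toList ∈ pvSafe := List.contains_iff_mem.1 hc
          simp only [pvAnc, List.any_eq_true, Bool.or_eq_true, beq_iff_eq]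
          exact ⟨s.toList, hmem, Or.inl rfl⟩
        rw [hc, hanc, Bool.true_or]
      · rw [Bool.not_eq_true] at hc
        rw [hc, Bool.false_or]
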